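-- pv_equiv track=rewrite | github.com/tevem1207/Algo | chshin/[PGS_92344] 파괴되지 않은 건물/PGS_92344.py | solution
-- ===== SOURCE A (Python) =====
-- def solution(board, skill):
--     answer = 0
--     N, M = len(board), len(board[0])
--     tmp = [[0] * (M + 1) for _ in range(N + 1)]  # 누적합 기록을 위한 배열
--
--     for heal, r1, c1, r2, c2, degree in skill:
--         # type (attack = 1, heal = 2)
--         # 누적합 기록, 부호에 주의할 것
--         tmp[r1][c1] += degree if heal == 2 else -degree
--         tmp[r1][c2 + 1] += -degree if heal == 2 else degree
--         tmp[r2 + 1][c1] += -degree if heal == 2 else degree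
--         tmp[r2 + 1][c2 + 1] += degree if heal == 2 else -degree
--
--     # 행 기준 누적합
--     for i in range(N):
--         for j in range(M):
--             tmp[i][j + 1] += tmp[i][j]
--
--     # 열 기준 누적합
--     for j in range(M):
--         for i in range(N):
--             tmp[i + 1][j] += tmp[i][j]
--
--     # 기존 배열과 합함
--     for i in range(N):
--         for j in range(M):
--             board[i][j] += tmp[i][j]
--             # board에 값이 1이상인 경우 answer += 1
--             if board[i][j] > 0:
--                 answer += 1
--
--     return answer
-- ===== SOURCE B (Python) =====
-- def solution(board, skill):
--     N, M = len(board), len(board[0])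
--     for heal, r1, c1, r2, c2, degree in skill:
--         delta = degree if heal == 2 else -degree
--         for i in range(r1, r2 + 1):
--             for j in range(c1, c2 + 1):
--                 board[i][j] += delta
--     return sum(1 for i in range(N) for j in range(M) if board[i][j] > 0)
-- ===== Notes on version B (the rewrite author's own statement) =====
-- stated objective: simpler
-- what changed: B drops A's (N+1)x(M+1) difference array and its two prefix-sum passes entirely: each skill's delta is added directly into every board cell of its rectangle, then the positive cells are counted in one plain scan.
-- outside the precondition, e.g. on solution([[1], [1], [1]], [[2, 2, 0, 0, 0, 5]]): A returns 2, B returns 3; on solution([[1, 1], [1, 1]], [[2, -2, 0, -1, 1, 3]]): A returns 2, B returns 4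
import Mathlib
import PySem

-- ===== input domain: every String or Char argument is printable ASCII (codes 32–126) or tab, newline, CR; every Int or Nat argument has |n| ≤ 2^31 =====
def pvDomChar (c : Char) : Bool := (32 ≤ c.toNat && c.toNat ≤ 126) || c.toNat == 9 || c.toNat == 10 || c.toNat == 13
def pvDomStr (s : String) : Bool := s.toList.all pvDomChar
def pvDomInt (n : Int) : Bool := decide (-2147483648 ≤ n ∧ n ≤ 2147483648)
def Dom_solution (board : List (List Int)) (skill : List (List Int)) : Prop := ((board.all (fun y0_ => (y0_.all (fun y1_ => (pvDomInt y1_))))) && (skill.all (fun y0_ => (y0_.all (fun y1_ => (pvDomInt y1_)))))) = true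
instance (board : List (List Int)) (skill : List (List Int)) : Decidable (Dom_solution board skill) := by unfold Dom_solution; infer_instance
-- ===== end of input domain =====

-- B replaces A's 2D difference array + two prefix-sum passes by direct per-cell rectangle
-- updates and a plain positive-cell count (simpler: no auxiliary (N+1)×(M+1) array).
-- Python A and B both mutate `board` in place; the equivalence proved here is about the
-- RETURN value only.

-- Shared low-level index helpers (Python's `t[i][j]` read and `t[i][j] += d` write).
-- Python index normalisation: a negative index counts from the end.
def pvIdx (n : Nat) (i : Int) : Int := if i < 0 then i + n else i

-- `pvGet2 t i j` = `t[i][j]` for in-range Nat indices (out of range: default 0, unreached under Pre_)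
def pvGet2 (t : List (List Int)) (i j : Nat) : Int := (t.getD i []).getD j 0

-- `t[i][j] += d` at Nat indices (A's loops over range(N)/range(M) only produce in-range indices)
def pvAdd2 (t : List (List Int)) (i j : Nat) (d : Int) : List (List Int) :=
  t.modify i (fun row => row.modify j (· + d))
-- Python index normalisation: a negative index counts from the end

-- `row[j] += d` at a Python Int index: exact for in-range indices including negative wrap;
-- where Python raises IndexError (excluded by Pre_) this is a no-op.
def pvAddRow (row : List Int) (j : Int) (d : Int) : List Int :=
  if 0 ≤ pvIdx row.length j ∧ pvIdx row.length j < row.length then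
    row.modify (pvIdx row.length j).toNat (· + d)
  else row

-- `t[i][j] += d` at Python Int indices (same caveat as pvAddRow)
def pvAdd2i (t : List (List Int)) (i j : Int) (d : Int) : List (List Int) :=
  if 0 ≤ pvIdx t.length i ∧ pvIdx t.length i < t.length then
    t.modify (pvIdx t.length i).toNat (fun row => pvAddRow row j d)
  else t


-- ===== PORT A =====
-- the body of A's `for heal, r1, c1, r2, c2, degree in skill` loop (4 difference-array updates);
-- a skill row of another length raises ValueError on unpacking (excluded by Pre_)
def pvDiffStep (t : List (List Int)) (s : List Int) : List (List Int) :=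
  match s with
  | [heal, r1, c1, r2, c2, degree] =>
    let t1 := pvAdd2i t r1 c1 (if heal == 2 then degree else -degree)
    let t2 := pvAdd2i t1 r1 (c2 + 1) (if heal == 2 then -degree else degree)
    let t3 := pvAdd2i t2 (r2 + 1) c1 (if heal == 2 then -degree else degree)
    pvAdd2i t3 (r2 + 1) (c2 + 1) (if heal == 2 then degree else -degree)
  | _ => t

-- A's row prefix pass `for j in range(M): tmp[i][j+1] += tmp[i][j]`
def pvRowPass (M : Nat) (t : List (List Int)) (i : Nat) : List (List Int) :=
  (List.range M).foldl (fun t j => pvAdd2 t i (j + 1) (pvGet2 t i j)) t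

-- A's column prefix pass `for i in range(N): tmp[i+1][j] += tmp[i][j]`
def pvColPass (N : Nat) (t : List (List Int)) (j : Nat) : List (List Int) :=
  (List.range N).foldl (fun t i => pvAdd2 t (i + 1) j (pvGet2 t i j)) t

-- A's final row loop: `board[i][j] += tmp[i][j]; if board[i][j] > 0: answer += 1` for j in range(M)
def pvFinRow (T : List (List Int)) (M : Nat) (p : List (List Int) × Int) (i : Nat) :
    List (List Int) × Int :=
  (List.range M).foldl (fun p j =>
    let bd := pvAdd2 p.1 i j (pvGet2 T i j)
    (bd, if pvGet2 bd i j > 0 then p.2 + 1 else p.2)) p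

-- literal transliteration of A: build the (N+1)×(M+1) difference array from the skills,
-- row prefix pass, column prefix pass, then add into board and count positives.
def solution (board : List (List Int)) (skill : List (List Int)) : Int :=
  let N := board.length
  let M := (board.headD []).length   -- len(board[0]); board = [] raises IndexError (excluded by Pre_)
  let tmp0 : List (List Int) := List.replicate (N + 1) (List.replicate (M + 1) (0 : Int))
  let tmp1 := skill.foldl pvDiffStep tmp0
  let tmp2 := (List.range N).foldl (pvRowPass M) tmp1
  let tmp3 := (List.range M).foldl (pvColPass N) tmp2
  ((List.range N).foldl (pvFinRow tmp3 M) (board, 0)).2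

-- ===== PORT B =====
-- B's inner loop `for j in range(c1, c2 + 1): board[i][j] += delta`
def pvRectRow (delta : Int) (c1 c2 : Int) (bd : List (List Int)) (i : Int) : List (List Int) :=
  (PySem.List.pyRange c1 (c2 + 1) 1).foldl (fun bd j => pvAdd2i bd i j delta) bd

-- B's per-skill rectangle update (delta = degree if heal == 2 else -degree)
def pvRectStep (bd : List (List Int)) (s : List Int) : List (List Int) :=
  match s with
  | [heal, r1, c1, r2, c2, degree] =>
    let delta := if heal == 2 then degree else -degree
    (PySem.List.pyRange r1 (r2 + 1) 1).foldl (pvRectRow delta c1 c2) bd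
  | _ => bd

-- B's final count `sum(1 for i in range(N) for j in range(M) if board[i][j] > 0)`
def pvCount (N M : Nat) (f : Nat → Nat → Int) : Int :=
  (List.range N).foldl (fun a i =>
    (List.range M).foldl (fun a j => if f i j > 0 then a + 1 else a) a) 0

-- literal transliteration of B (Source B): add each skill's delta directly into the cells of its
-- rectangle, then count the positive cells among board[i][j], i < N, j < M.
def solution_alt (board : List (List Int)) (skill : List (List Int)) : Int :=
  let N := board.length
  let M := (board.headD []).length   -- len(board[0]); board = [] raises IndexError (excluded by Pre_)
  let bd := skill.foldl pvRectStep board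
  pvCount N M (fun i j => pvGet2 bd i j)

-- ===== PRECONDITION & SPEC =====
-- does skill row s = [heal, r1, c1, r2, c2, degree] describe a real rectangle inside an N×M board?
def pvSkillOK (N M : Int) (s : List Int) : Bool :=
  match s with
  | [_, r1, c1, r2, c2, _] =>
    decide (0 ≤ r1 ∧ r1 ≤ r2 ∧ r2 < N ∧ 0 ≤ c1 ∧ c1 ≤ c2 ∧ c2 < M)
  | _ => false

-- Pre_ excludes the inputs on which A raises (empty board, a row shorter than row 0, a skill row
-- whose length is not 6, a rectangle corner outside the (N+1)×(M+1) difference grid) and, as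
-- defensible corners nobody would specify, skills with negative corners (Python's negative-index
-- wraparound) or inverted rectangles r1 > r2 / c1 > c2 (where A's difference-array algebra
-- produces accidental negative bands while B's empty rectangle loop does nothing).
def Pre_solution (board : List (List Int)) (skill : List (List Int)) : Prop :=
  board ≠ [] ∧
  (∀ row ∈ board, (board.headD []).length ≤ row.length) ∧
  (∀ s ∈ skill, pvSkillOK board.length (board.headD []).length s = true)

instance (board : List (List Int)) (skill : List (List Int)) : Decidable (Pre_solution board skill) := by
  unfold Pre_solution; infer_instance

def pvWitness_solution : List (List Int) × List (List Int) :=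
  ([[1, -2], [0, 3]], [[2, 0, 0, 1, 1, 1], [1, 0, 1, 1, 1, 2]])

def Spec_solution (board : List (List Int)) (skill : List (List Int)) (out : Int) : Prop := out = solution_alt board skill
instance (board : List (List Int)) (skill : List (List Int)) (out : Int) : Decidable (Spec_solution board skill out) := by unfold Spec_solution; infer_instance

-- ===== CLAIM (what is proved, stated in full; the proofs are below) =====
def Claim_equal_solution : Prop := ∀ (board : List (List Int)) (skill : List (List Int)), Dom_solution board skill → Pre_solution board skill → Spec_solution board skill (solution board skill)

-- ===== LEMMAS AND PROOFS =====

theorem pv_witness_ok :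
    Dom_solution pvWitness_solution.1 pvWitness_solution.2 ∧
    Pre_solution pvWitness_solution.1 pvWitness_solution.2 := by decide

-- proof-side notions: exact shape (A's tmp array), lower-bound shape (the board),
-- a skill's 4-point difference mask pvDif, and its intended rectangle effect pvEff
def pvShape (t : List (List Int)) (n m : Nat) : Prop :=
  t.length = n ∧ ∀ a : Nat, a < n → (t.getD a []).length = m

def pvDif (s : List Int) (a b : Nat) : Int :=
  match s with
  | [heal, r1, c1, r2, c2, d] =>
    let dd := if heal == 2 then d else -d
    (if r1 = (a : Int) ∧ c1 = (b : Int) then dd else 0) +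
    (if r1 = (a : Int) ∧ c2 + 1 = (b : Int) then -dd else 0) +
    (if r2 + 1 = (a : Int) ∧ c1 = (b : Int) then -dd else 0) +
    (if r2 + 1 = (a : Int) ∧ c2 + 1 = (b : Int) then dd else 0)
  | _ => 0

def pvEff (s : List Int) (a b : Nat) : Int :=
  match s with
  | [heal, r1, c1, r2, c2, d] =>
    if r1 ≤ (a : Int) ∧ (a : Int) ≤ r2 ∧ c1 ≤ (b : Int) ∧ (b : Int) ≤ c2 then
      (if heal == 2 then d else -d)
    else 0
  | _ => 0

def pvBShape (t : List (List Int)) (N M : Nat) : Prop :=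
  t.length = N ∧ ∀ a : Nat, a < N → M ≤ (t.getD a []).length

theorem pvGetD_modify {α : Type} (l : List α) (i a : Nat) (f : α → α) (d : α) :
    (l.modify i f).getD a d = if i = a ∧ a < l.length then f (l.getD a d) else l.getD a d := by
  simp only [List.getD_eq_getElem?_getD, List.getElem?_modify]
  by_cases h : i = a
  · subst h
    by_cases hl : i < l.length
    · simp [hl]
    · have h0 : l[i]? = none := by rw [List.getElem?_eq_none_iff]; omega
      simp [hl]
  · simp [h]

theorem pvGet2_pvAdd2 (t : List (List Int)) (i j : Nat) (d : Int) (a b : Nat)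
    (hi : i < t.length) (hj : j < (t.getD i []).length) :
    pvGet2 (pvAdd2 t i j d) a b = pvGet2 t a b + (if i = a ∧ j = b then d else 0) := by
  unfold pvGet2 pvAdd2
  rw [pvGetD_modify]
  by_cases hia : i = a
  · subst hia
    rw [if_pos ⟨rfl, hi⟩, pvGetD_modify]
    by_cases hjb : j = b
    · subst hjb; rw [if_pos ⟨rfl, hj⟩]; simp
    · rw [if_neg (by simp [hjb])]; simp [hjb]
  · rw [if_neg (by simp [hia])]; simp [hia]

theorem pvLen_pvAdd2 (t : List (List Int)) (i j : Nat) (d : Int) :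
    (pvAdd2 t i j d).length = t.length := by simp [pvAdd2]

theorem pvRowLen_pvAdd2 (t : List (List Int)) (i j : Nat) (d : Int) (a : Nat) :
    ((pvAdd2 t i j d).getD a []).length = (t.getD a []).length := by
  unfold pvAdd2
  rw [pvGetD_modify]
  split <;> simp

theorem pvLen_pvAddRow (row : List Int) (j : Int) (d : Int) :
    (pvAddRow row j d).length = row.length := by
  unfold pvAddRow
  split <;> simp

theorem pvGet2_pvAdd2i (t : List (List Int)) (i j : Int) (d : Int) (a b : Nat)
    (hi0 : 0 ≤ i) (hi : i < (t.length : Int)) (hj0 : 0 ≤ j)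
    (hj : j < ((t.getD i.toNat []).length : Int)) :
    pvGet2 (pvAdd2i t i j d) a b
      = pvGet2 t a b + (if i = (a : Int) ∧ j = (b : Int) then d else 0) := by
  unfold pvGet2 pvAdd2i
  have h1 : pvIdx t.length i = i := by simp [pvIdx]; omega
  rw [h1, if_pos ⟨hi0, hi⟩, pvGetD_modify]
  by_cases hia : i = (a : Int)
  · have hia' : i.toNat = a := by omega
    have ha : a < t.length := by omega
    rw [if_pos ⟨hia', ha⟩]
    have hj' : j < ((t.getD a []).length : Int) := by rw [← hia']; exact hj
    unfold pvAddRow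
    have h2 : pvIdx (t.getD a []).length j = j := by simp [pvIdx]; omega
    rw [h2, if_pos ⟨hj0, hj'⟩, pvGetD_modify]
    by_cases hjb : j = (b : Int)
    · have hjb' : j.toNat = b := by omega
      have hb : b < (t.getD a []).length := by omega
      rw [if_pos ⟨hjb', hb⟩, if_pos ⟨hia, hjb⟩]
    · rw [if_neg (by intro h; exact hjb (by omega)), if_neg (by simp [hjb])]
      simp
  · rw [if_neg (by intro h; exact hia (by omega)), if_neg (by simp [hia])]
    simp

theorem pvLen_pvAdd2i (t : List (List Int)) (i j : Int) (d : Int) :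
    (pvAdd2i t i j d).length = t.length := by
  unfold pvAdd2i
  split <;> simp

theorem pvRowLen_pvAdd2i (t : List (List Int)) (i j : Int) (d : Int) (a : Nat) :
    ((pvAdd2i t i j d).getD a []).length = (t.getD a []).length := by
  unfold pvAdd2i
  split
  · rw [pvGetD_modify]; split <;> simp [pvLen_pvAddRow]
  · rfl

theorem pvShape_pvAdd2i (t : List (List Int)) (i j : Int) (d : Int) (n m : Nat)
    (h : pvShape t n m) : pvShape (pvAdd2i t i j d) n m := by
  obtain ⟨h1, h2⟩ := h
  exact ⟨by rw [pvLen_pvAdd2i, h1], fun a ha => by rw [pvRowLen_pvAdd2i]; exact h2 a ha⟩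

theorem pvShape_pvAdd2 (t : List (List Int)) (i j : Nat) (d : Int) (n m : Nat)
    (h : pvShape t n m) : pvShape (pvAdd2 t i j d) n m := by
  obtain ⟨h1, h2⟩ := h
  exact ⟨by rw [pvLen_pvAdd2, h1], fun a ha => by rw [pvRowLen_pvAdd2]; exact h2 a ha⟩

theorem pvShape_pvDiffStep (t : List (List Int)) (s : List Int) (n m : Nat)
    (h : pvShape t n m) : pvShape (pvDiffStep t s) n m := by
  unfold pvDiffStep
  match s with
  | [] => exact h
  | [x1] => exact h
  | [x1,x2] => exact h
  | [x1,x2,x3] => exact h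
  | [x1,x2,x3,x4] => exact h
  | [x1,x2,x3,x4,x5] => exact h
  | x1 :: x2 :: x3 :: x4 :: x5 :: x6 :: x7 :: rest => exact h
  | [heal, r1, c1, r2, c2, degree] =>
    exact pvShape_pvAdd2i _ _ _ _ _ _ (pvShape_pvAdd2i _ _ _ _ _ _
      (pvShape_pvAdd2i _ _ _ _ _ _ (pvShape_pvAdd2i _ _ _ _ _ _ h)))

theorem pvGet2_pvDiffStep (t : List (List Int)) (s : List Int) (N M : Nat) (a b : Nat)
    (hok : pvSkillOK (N : Int) (M : Int) s = true) (hsh : pvShape t (N + 1) (M + 1)) :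
    pvGet2 (pvDiffStep t s) a b = pvGet2 t a b + pvDif s a b := by
  match s with
  | [heal, r1, c1, r2, c2, degree] =>
    simp only [pvSkillOK, decide_eq_true_eq] at hok
    obtain ⟨hr0, hrr, hrN, hc0, hcc, hcM⟩ := hok
    -- all four update points are in range
    have key : ∀ (t' : List (List Int)), pvShape t' (N+1) (M+1) → ∀ (x y : Int), 0 ≤ x → x ≤ N → 0 ≤ y → y ≤ M → ∀ d,
        pvGet2 (pvAdd2i t' x y d) a b = pvGet2 t' a b + (if x = (a:Int) ∧ y = (b:Int) then d else 0) := by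
      intro t' ⟨hl, hr⟩ x y hx0 hxN hy0 hyM d
      apply pvGet2_pvAdd2i
      · exact hx0
      · omega
      · exact hy0
      · have := hr x.toNat (by omega); omega
    have s1 := pvShape_pvAdd2i t r1 c1 (if heal == 2 then degree else -degree) _ _ hsh
    have s2 := pvShape_pvAdd2i _ r1 (c2+1) (if heal == 2 then -degree else degree) _ _ s1
    have s3 := pvShape_pvAdd2i _ (r2+1) c1 (if heal == 2 then -degree else degree) _ _ s2
    unfold pvDiffStep
    rw [key _ s3 _ _ (by omega) (by omega) (by omega) (by omega),
        key _ s2 _ _ (by omega) (by omega) (by omega) (by omega),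
        key _ s1 _ _ (by omega) (by omega) (by omega) (by omega),
        key _ hsh _ _ (by omega) (by omega) (by omega) (by omega)]
    unfold pvDif
    by_cases hh : heal == 2 <;> simp [hh] <;> ring
  | [] => simp [pvSkillOK] at hok
  | [x1] => simp [pvSkillOK] at hok
  | [x1,x2] => simp [pvSkillOK] at hok
  | [x1,x2,x3] => simp [pvSkillOK] at hok
  | [x1,x2,x3,x4] => simp [pvSkillOK] at hok
  | [x1,x2,x3,x4,x5] => simp [pvSkillOK] at hok
  | x1 :: x2 :: x3 :: x4 :: x5 :: x6 :: x7 :: rest => simp [pvSkillOK] at hok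

theorem pvGet2_skillfold (skill : List (List Int)) (t : List (List Int)) (N M : Nat) (a b : Nat)
    (hok : ∀ s ∈ skill, pvSkillOK (N : Int) (M : Int) s = true)
    (hsh : pvShape t (N + 1) (M + 1)) :
    pvGet2 (skill.foldl pvDiffStep t) a b
      = pvGet2 t a b + (skill.map (fun s => pvDif s a b)).sum := by
  induction skill generalizing t with
  | nil => simp
  | cons s rest ih =>
    simp only [List.foldl_cons, List.map_cons, List.sum_cons]
    rw [ih _ (fun x hx => hok x (by simp [hx])) (pvShape_pvDiffStep _ _ _ _ hsh),
        pvGet2_pvDiffStep _ _ N M _ _ (hok s (by simp)) hsh]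
    ring

theorem pvShape_skillfold (skill : List (List Int)) (t : List (List Int)) (n m : Nat)
    (hsh : pvShape t n m) : pvShape (skill.foldl pvDiffStep t) n m := by
  induction skill generalizing t with
  | nil => exact hsh
  | cons s rest ih => exact ih _ (pvShape_pvDiffStep _ _ _ _ hsh)

theorem pvGet2_tmp0 (N M : Nat) (a b : Nat) :
    pvGet2 (List.replicate (N + 1) (List.replicate (M + 1) (0 : Int))) a b = 0 := by
  simp only [pvGet2, List.getD_eq_getElem?_getD, List.getElem?_replicate]
  split <;> (simp [List.getElem?_replicate]; try (split <;> simp))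

theorem pvShape_tmp0 (N M : Nat) :
    pvShape (List.replicate (N + 1) (List.replicate (M + 1) (0 : Int))) (N + 1) (M + 1) := by
  constructor
  · simp
  · intro a ha
    simp [List.getD_eq_getElem?_getD, ha]

theorem pvShape_foldl {α : Type} (n m : Nat) (l : List α)
    (f : List (List Int) → α → List (List Int))
    (hf : ∀ t x, pvShape t n m → pvShape (f t x) n m) :
    ∀ t, pvShape t n m → pvShape (l.foldl f t) n m := by
  induction l with
  | nil => intro t h; exact h
  | cons x xs ih => intro t h; exact ih _ (hf t x h)

theorem pvShape_pvRowPass (n m M : Nat) (t : List (List Int)) (i : Nat)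
    (h : pvShape t n m) : pvShape (pvRowPass M t i) n m :=
  pvShape_foldl n m _ _ (fun t j h => pvShape_pvAdd2 t i (j+1) _ n m h) t h

theorem pvShape_pvColPass (n m N : Nat) (t : List (List Int)) (j : Nat)
    (h : pvShape t n m) : pvShape (pvColPass N t j) n m :=
  pvShape_foldl n m _ _ (fun t i h => pvShape_pvAdd2 t (i+1) j _ n m h) t h

theorem pvRowPass_aux (N M i : Nat) (t : List (List Int)) (hsh : pvShape t (N+1) (M+1)) (hi : i < N) :
    ∀ m, m ≤ M → ∀ a b, pvGet2 ((List.range m).foldl (fun t j => pvAdd2 t i (j + 1) (pvGet2 t i j)) t) a b =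
      if i = a ∧ b ≤ m then ∑ k ∈ Finset.range (b+1), pvGet2 t i k else pvGet2 t a b := by
  intro m
  induction m with
  | zero =>
    intro _ a b
    simp only [List.range_zero, List.foldl_nil]
    split
    · rename_i h
      obtain ⟨h1, h2⟩ := h
      subst h1
      have : b = 0 := by omega
      subst this
      simp
    · rfl
  | succ m ih =>
    intro hm a b
    have hm' : m ≤ M := by omega
    have hsh' := pvShape_foldl (N+1) (M+1) (List.range m)
      (fun t j => pvAdd2 t i (j + 1) (pvGet2 t i j))
      (fun t j h => pvShape_pvAdd2 t i (j+1) _ _ _ h) t hsh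
    have hlen := hsh'.1
    have hrow := hsh'.2 i (by omega)
    rw [List.range_succ, List.foldl_append, List.foldl_cons, List.foldl_nil]
    rw [pvGet2_pvAdd2 _ _ _ _ _ _ (by omega) (by omega)]
    rw [ih hm' a b, ih hm' i m]
    rw [if_pos (show i = i ∧ m ≤ m from ⟨rfl, le_refl m⟩)]
    by_cases hia : i = a
    · subst hia
      by_cases hb : m + 1 = b
      · subst hb
        rw [if_neg (show ¬ (i = i ∧ m + 1 ≤ m) by omega),
            if_pos (show i = i ∧ m + 1 = m + 1 from ⟨rfl, rfl⟩),
            if_pos (show i = i ∧ m + 1 ≤ m + 1 from ⟨rfl, le_refl _⟩),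
            Finset.sum_range_succ (f := fun k => pvGet2 t i k) (n := m + 1)]
        ring
      · by_cases hbm : b ≤ m
        · rw [if_pos (show i = i ∧ b ≤ m from ⟨rfl, hbm⟩),
              if_pos (show i = i ∧ b ≤ m + 1 from ⟨rfl, by omega⟩),
              if_neg (show ¬ (i = i ∧ m + 1 = b) by omega)]
          ring
        · rw [if_neg (show ¬ (i = i ∧ b ≤ m) by omega),
              if_neg (show ¬ (i = i ∧ b ≤ m + 1) by omega),
              if_neg (show ¬ (i = i ∧ m + 1 = b) by omega)]
          ring
    · rw [if_neg (show ¬ (i = a ∧ b ≤ m) by exact fun h => hia h.1),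
          if_neg (show ¬ (i = a ∧ b ≤ m + 1) by exact fun h => hia h.1),
          if_neg (show ¬ (i = a ∧ m + 1 = b) by exact fun h => hia h.1)]
      ring

theorem pvRowPass_get (N M i : Nat) (t : List (List Int)) (hsh : pvShape t (N+1) (M+1)) (hi : i < N)
    (a b : Nat) : pvGet2 (pvRowPass M t i) a b =
      if i = a ∧ b ≤ M then ∑ k ∈ Finset.range (b+1), pvGet2 t i k else pvGet2 t a b := by
  unfold pvRowPass
  exact pvRowPass_aux N M i t hsh hi M (le_refl M) a b

theorem pvRowsFold (N M : Nat) (t : List (List Int)) (hsh : pvShape t (N+1) (M+1)) :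
    ∀ n, n ≤ N → ∀ a b, pvGet2 ((List.range n).foldl (pvRowPass M) t) a b =
      if a < n ∧ b ≤ M then ∑ k ∈ Finset.range (b+1), pvGet2 t a k else pvGet2 t a b := by
  intro n
  induction n with
  | zero => intro _ a b; simp
  | succ n ih =>
    intro hn a b
    have hn' : n ≤ N := by omega
    have hsh' := pvShape_foldl (N+1) (M+1) (List.range n) (pvRowPass M)
      (fun t i h => pvShape_pvRowPass _ _ _ t i h) t hsh
    rw [List.range_succ, List.foldl_append, List.foldl_cons, List.foldl_nil]
    rw [pvRowPass_get N M n _ hsh' (by omega) a b]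
    by_cases hna : n = a
    · subst hna
      by_cases hbM : b ≤ M
      · rw [if_pos ⟨rfl, hbM⟩, if_pos ⟨by omega, hbM⟩]
        apply Finset.sum_congr rfl
        intro k hk
        rw [ih hn' n k, if_neg (by omega)]
      · rw [if_neg (by omega), ih hn' n b, if_neg (by omega), if_neg (by omega)]
    · rw [if_neg (by omega), ih hn' a b]
      by_cases hcase : a < n ∧ b ≤ M
      · rw [if_pos hcase, if_pos ⟨by omega, hcase.2⟩]
      · rw [if_neg hcase, if_neg (by omega)]

theorem pvColPass_aux (N M j : Nat) (t : List (List Int)) (hsh : pvShape t (N+1) (M+1)) (hj : j < M) :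
    ∀ n, n ≤ N → ∀ a b, pvGet2 ((List.range n).foldl (fun t i => pvAdd2 t (i + 1) j (pvGet2 t i j)) t) a b =
      if j = b ∧ a ≤ n then ∑ k ∈ Finset.range (a+1), pvGet2 t k b else pvGet2 t a b := by
  intro n
  induction n with
  | zero =>
    intro _ a b
    simp only [List.range_zero, List.foldl_nil]
    split
    · rename_i h
      obtain ⟨h1, h2⟩ := h
      subst h1
      have : a = 0 := by omega
      subst this
      simp
    · rfl
  | succ n ih =>
    intro hn a b
    have hn' : n ≤ N := by omega
    have hsh' := pvShape_foldl (N+1) (M+1) (List.range n)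
      (fun t i => pvAdd2 t (i + 1) j (pvGet2 t i j))
      (fun t i h => pvShape_pvAdd2 t (i+1) j _ _ _ h) t hsh
    have hlen := hsh'.1
    have hrow := hsh'.2 (n+1) (by omega)
    rw [List.range_succ, List.foldl_append, List.foldl_cons, List.foldl_nil]
    rw [pvGet2_pvAdd2 _ _ _ _ _ _ (by omega) (by omega)]
    rw [ih hn' a b, ih hn' n j]
    rw [if_pos (show j = j ∧ n ≤ n from ⟨rfl, le_refl n⟩)]
    by_cases hjb : j = b
    · subst hjb
      by_cases ha : n + 1 = a
      · subst ha
        rw [if_neg (show ¬ (j = j ∧ n + 1 ≤ n) by omega),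
            if_pos (show n + 1 = n + 1 ∧ j = j from ⟨rfl, rfl⟩),
            if_pos (show j = j ∧ n + 1 ≤ n + 1 from ⟨rfl, le_refl _⟩),
            Finset.sum_range_succ (f := fun k => pvGet2 t k j) (n := n + 1)]
        ring
      · by_cases han : a ≤ n
        · rw [if_pos (show j = j ∧ a ≤ n from ⟨rfl, han⟩),
              if_pos (show j = j ∧ a ≤ n + 1 from ⟨rfl, by omega⟩),
              if_neg (show ¬ (n + 1 = a ∧ j = j) by omega)]
          ring
        · rw [if_neg (show ¬ (j = j ∧ a ≤ n) by omega),
              if_neg (show ¬ (j = j ∧ a ≤ n + 1) by omega),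
              if_neg (show ¬ (n + 1 = a ∧ j = j) by omega)]
          ring
    · rw [if_neg (show ¬ (j = b ∧ a ≤ n) by exact fun h => hjb h.1),
          if_neg (show ¬ (j = b ∧ a ≤ n + 1) by exact fun h => hjb h.1),
          if_neg (show ¬ (n + 1 = a ∧ j = b) by exact fun h => hjb h.2)]
      ring

theorem pvColPass_get (N M j : Nat) (t : List (List Int)) (hsh : pvShape t (N+1) (M+1)) (hj : j < M)
    (a b : Nat) : pvGet2 (pvColPass N t j) a b =
      if j = b ∧ a ≤ N then ∑ k ∈ Finset.range (a+1), pvGet2 t k b else pvGet2 t a b := by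
  unfold pvColPass
  exact pvColPass_aux N M j t hsh hj N (le_refl N) a b

theorem pvColsFold (N M : Nat) (t : List (List Int)) (hsh : pvShape t (N+1) (M+1)) :
    ∀ m, m ≤ M → ∀ a b, pvGet2 ((List.range m).foldl (pvColPass N) t) a b =
      if b < m ∧ a ≤ N then ∑ k ∈ Finset.range (a+1), pvGet2 t k b else pvGet2 t a b := by
  intro m
  induction m with
  | zero => intro _ a b; simp
  | succ m ih =>
    intro hm a b
    have hm' : m ≤ M := by omega
    have hsh' := pvShape_foldl (N+1) (M+1) (List.range m) (pvColPass N)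
      (fun t j h => pvShape_pvColPass _ _ _ t j h) t hsh
    rw [List.range_succ, List.foldl_append, List.foldl_cons, List.foldl_nil]
    rw [pvColPass_get N M m _ hsh' (by omega) a b]
    by_cases hmb : m = b
    · subst hmb
      by_cases haN : a ≤ N
      · rw [if_pos ⟨rfl, haN⟩, if_pos ⟨by omega, haN⟩]
        apply Finset.sum_congr rfl
        intro k hk
        rw [ih hm' k m, if_neg (by omega)]
      · rw [if_neg (by omega), ih hm' a m, if_neg (by omega), if_neg (by omega)]
    · rw [if_neg (by omega), ih hm' a b]
      by_cases hcase : b < m ∧ a ≤ N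
      · rw [if_pos hcase, if_pos ⟨by omega, hcase.2⟩]
      · rw [if_neg hcase, if_neg (by omega)]

theorem pvSumPoint1 (y : Int) (hy : 0 ≤ y) (v : Int) (j : Nat) :
    ∑ b ∈ Finset.range (j+1), (if y = (b : Int) then v else 0) = if y ≤ (j : Int) then v else 0 := by
  have h1 : ∀ b ∈ Finset.range (j+1), (if y = (b : Int) then v else 0) = (if b = y.toNat then v else 0) := by
    intro b _
    split_ifs <;> first | rfl | (exfalso; omega)
  rw [Finset.sum_congr rfl h1, Finset.sum_ite_eq' (Finset.range (j+1)) y.toNat (fun _ => v)]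
  simp only [Finset.mem_range]
  split_ifs <;> first | rfl | (exfalso; omega)

theorem pvSumPoint (x y : Int) (hx : 0 ≤ x) (hy : 0 ≤ y) (v : Int) (i j : Nat) :
    ∑ a ∈ Finset.range (i+1), ∑ b ∈ Finset.range (j+1), (if x = (a : Int) ∧ y = (b : Int) then v else 0)
      = if x ≤ (i : Int) ∧ y ≤ (j : Int) then v else 0 := by
  have h1 : ∀ a ∈ Finset.range (i+1),
      (∑ b ∈ Finset.range (j+1), (if x = (a : Int) ∧ y = (b : Int) then v else 0))
        = (if x = (a : Int) then (if y ≤ (j : Int) then v else 0) else 0) := by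
    intro a _
    by_cases hxa : x = (a : Int)
    · simp only [hxa, true_and]
      exact pvSumPoint1 y hy v j
    · simp [hxa]
  rw [Finset.sum_congr rfl h1, pvSumPoint1 x hx _ i]
  split_ifs <;> first | rfl | (exfalso; tauto)

theorem pvDifSum (s : List Int) (N M : Int) (hok : pvSkillOK N M s = true) (i j : Nat) :
    ∑ a ∈ Finset.range (i+1), ∑ b ∈ Finset.range (j+1), pvDif s a b = pvEff s i j := by
  match s with
  | [heal, r1, c1, r2, c2, d] =>
    simp only [pvSkillOK, decide_eq_true_eq] at hok
    obtain ⟨hr0, hrr, hrN, hc0, hcc, hcM⟩ := hok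
    simp only [pvDif, pvEff]
    simp only [Finset.sum_add_distrib]
    rw [pvSumPoint r1 c1 (by omega) (by omega), pvSumPoint r1 (c2+1) (by omega) (by omega),
        pvSumPoint (r2+1) c1 (by omega) (by omega), pvSumPoint (r2+1) (c2+1) (by omega) (by omega)]
    split_ifs <;> omega
  | [] => simp [pvSkillOK] at hok
  | [x1] => simp [pvSkillOK] at hok
  | [x1,x2] => simp [pvSkillOK] at hok
  | [x1,x2,x3] => simp [pvSkillOK] at hok
  | [x1,x2,x3,x4] => simp [pvSkillOK] at hok
  | [x1,x2,x3,x4,x5] => simp [pvSkillOK] at hok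
  | x1 :: x2 :: x3 :: x4 :: x5 :: x6 :: x7 :: rest => simp [pvSkillOK] at hok

theorem pvTotalSwap (skill : List (List Int)) (N M : Int)
    (hok : ∀ s ∈ skill, pvSkillOK N M s = true) (i j : Nat) :
    ∑ a ∈ Finset.range (i+1), ∑ b ∈ Finset.range (j+1), (skill.map (fun s => pvDif s a b)).sum
      = (skill.map (fun s => pvEff s i j)).sum := by
  induction skill with
  | nil => simp
  | cons s rest ih =>
    simp only [List.map_cons, List.sum_cons, Finset.sum_add_distrib]
    rw [pvDifSum s N M (hok s (by simp)) i j, ih (fun x hx => hok x (by simp [hx]))]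

theorem pvBShape_pvAdd2i (t : List (List Int)) (i j : Int) (d : Int) (N M : Nat)
    (h : pvBShape t N M) : pvBShape (pvAdd2i t i j d) N M := by
  obtain ⟨h1, h2⟩ := h
  exact ⟨by rw [pvLen_pvAdd2i, h1], fun a ha => by rw [pvRowLen_pvAdd2i]; exact h2 a ha⟩

theorem pvBShape_pvAdd2 (t : List (List Int)) (i j : Nat) (d : Int) (N M : Nat)
    (h : pvBShape t N M) : pvBShape (pvAdd2 t i j d) N M := by
  obtain ⟨h1, h2⟩ := h
  exact ⟨by rw [pvLen_pvAdd2, h1], fun a ha => by rw [pvRowLen_pvAdd2]; exact h2 a ha⟩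

theorem pvBShape_foldl {α : Type} (N M : Nat) (l : List α)
    (f : List (List Int) → α → List (List Int))
    (hf : ∀ t x, pvBShape t N M → pvBShape (f t x) N M) :
    ∀ t, pvBShape t N M → pvBShape (l.foldl f t) N M := by
  induction l with
  | nil => intro t h; exact h
  | cons x xs ih => intro t h; exact ih _ (hf t x h)

theorem pvBShape_pvRectRow (delta c1 c2 : Int) (N M : Nat) (i : Int) (bd : List (List Int))
    (h : pvBShape bd N M) : pvBShape (pvRectRow delta c1 c2 bd i) N M :=
  pvBShape_foldl N M _ _ (fun t j h => pvBShape_pvAdd2i t i j delta N M h) bd h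

theorem pvRectRow_get (delta c1 c2 : Int) (N M : Nat) (i : Int)
    (hc0 : 0 ≤ c1) (hcM : c2 < (M : Int)) (hi0 : 0 ≤ i) (hiN : i < (N : Int)) :
    ∀ n : Nat, ∀ bd, (c2 + 1 - c1).toNat = n → pvBShape bd N M → ∀ a b : Nat, a < N → b < M →
      pvGet2 (pvRectRow delta c1 c2 bd i) a b
        = pvGet2 bd a b + (if i = (a : Int) ∧ c1 ≤ (b : Int) ∧ (b : Int) ≤ c2 then delta else 0) := by
  intro n
  induction n generalizing c1 with
  | zero =>
    intro bd hn hsh a b ha hb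
    unfold pvRectRow
    rw [PySem.List.pyRange_one_eq_nil (by omega), List.foldl_nil, if_neg (by omega)]
    ring
  | succ n ih =>
    intro bd hn hsh a b ha hb
    unfold pvRectRow
    rw [PySem.List.pyRange_one_cons (by omega), List.foldl_cons]
    have hl := hsh.1
    have hr := hsh.2 i.toNat (by omega)
    have hstep : pvGet2 (pvAdd2i bd i c1 delta) a b
        = pvGet2 bd a b + (if i = (a : Int) ∧ c1 = (b : Int) then delta else 0) := by
      apply pvGet2_pvAdd2i
      · exact hi0
      · omega
      · exact hc0
      · omega
    have ihres := ih (c1 + 1) (by omega) (pvAdd2i bd i c1 delta) (by omega)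
      (pvBShape_pvAdd2i _ _ _ _ _ _ hsh) a b ha hb
    unfold pvRectRow at ihres
    rw [ihres, hstep]
    split_ifs <;> omega

theorem pvRectStep_get (s : List Int) (N M : Nat) (bd : List (List Int))
    (hok : pvSkillOK (N : Int) (M : Int) s = true) (hsh : pvBShape bd N M)
    (a b : Nat) (ha : a < N) (hb : b < M) :
    pvGet2 (pvRectStep bd s) a b = pvGet2 bd a b + pvEff s a b := by
  match s with
  | [heal, r1, c1, r2, c2, d] =>
    simp only [pvSkillOK, decide_eq_true_eq] at hok
    obtain ⟨hr0, hrr, hrN, hc0, hcc, hcM⟩ := hok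
    unfold pvRectStep pvEff
    have main : ∀ n : Nat, ∀ r1' : Int, ∀ bd, (r2 + 1 - r1').toNat = n → 0 ≤ r1' → pvBShape bd N M →
        pvGet2 ((PySem.List.pyRange r1' (r2 + 1) 1).foldl (pvRectRow (if heal == 2 then d else -d) c1 c2) bd) a b
          = pvGet2 bd a b +
            (if r1' ≤ (a : Int) ∧ (a : Int) ≤ r2 ∧ c1 ≤ (b : Int) ∧ (b : Int) ≤ c2 then (if heal == 2 then d else -d) else 0) := by
      intro n
      induction n with
      | zero =>
        intro r1' bd hn h0 hsh
        rw [PySem.List.pyRange_one_eq_nil (by omega), List.foldl_nil, if_neg (by omega)]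
        ring
      | succ n ih =>
        intro r1' bd hn h0 hsh
        rw [PySem.List.pyRange_one_cons (by omega), List.foldl_cons]
        have hstep := pvRectRow_get (if heal == 2 then d else -d) c1 c2 N M r1' hc0 (by omega)
          (by omega) (by omega) (c2 + 1 - c1).toNat bd rfl hsh a b ha hb
        have ihres := ih (r1' + 1) (pvRectRow (if heal == 2 then d else -d) c1 c2 bd r1')
          (by omega) (by omega) (pvBShape_pvRectRow _ _ _ _ _ _ _ hsh)
        rw [ihres, hstep]
        split_ifs <;> omega
    rw [main (r2 + 1 - r1).toNat r1 bd rfl (by omega) hsh]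
  | [] => simp [pvSkillOK] at hok
  | [x1] => simp [pvSkillOK] at hok
  | [x1,x2] => simp [pvSkillOK] at hok
  | [x1,x2,x3] => simp [pvSkillOK] at hok
  | [x1,x2,x3,x4] => simp [pvSkillOK] at hok
  | [x1,x2,x3,x4,x5] => simp [pvSkillOK] at hok
  | x1 :: x2 :: x3 :: x4 :: x5 :: x6 :: x7 :: rest => simp [pvSkillOK] at hok

theorem pvBShape_pvRectStep (s : List Int) (N M : Nat) (bd : List (List Int))
    (h : pvBShape bd N M) : pvBShape (pvRectStep bd s) N M := by
  unfold pvRectStep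
  match s with
  | [] => exact h
  | [x1] => exact h
  | [x1,x2] => exact h
  | [x1,x2,x3] => exact h
  | [x1,x2,x3,x4] => exact h
  | [x1,x2,x3,x4,x5] => exact h
  | x1 :: x2 :: x3 :: x4 :: x5 :: x6 :: x7 :: rest => exact h
  | [heal, r1, c1, r2, c2, degree] =>
    exact pvBShape_foldl N M _ _ (fun t i h => pvBShape_pvRectRow _ _ _ _ _ _ _ h) bd h

theorem pvSkillFoldB (skill : List (List Int)) (bd : List (List Int)) (N M : Nat)
    (hok : ∀ s ∈ skill, pvSkillOK (N : Int) (M : Int) s = true) (hsh : pvBShape bd N M)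
    (a b : Nat) (ha : a < N) (hb : b < M) :
    pvGet2 (skill.foldl pvRectStep bd) a b
      = pvGet2 bd a b + (skill.map (fun s => pvEff s a b)).sum := by
  induction skill generalizing bd with
  | nil => simp
  | cons s rest ih =>
    simp only [List.foldl_cons, List.map_cons, List.sum_cons]
    rw [ih _ (fun x hx => hok x (by simp [hx])) (pvBShape_pvRectStep _ _ _ _ hsh),
        pvRectStep_get _ _ _ _ (hok s (by simp)) hsh a b ha hb]
    ring

theorem pvFoldlCongrMem {α β : Type} (l : List α) (f g : β → α → β) (init : β)
    (h : ∀ acc x, x ∈ l → f acc x = g acc x) : l.foldl f init = l.foldl g init := by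
  induction l generalizing init with
  | nil => rfl
  | cons x xs ih =>
    simp only [List.foldl_cons]
    rw [h init x (by simp)]
    exact ih _ (fun acc y hy => h acc y (by simp [hy]))

theorem pvCount_congr (N M : Nat) (f g : Nat → Nat → Int)
    (h : ∀ i, i < N → ∀ j, j < M → f i j = g i j) : pvCount N M f = pvCount N M g := by
  unfold pvCount
  apply pvFoldlCongrMem
  intro acc i hi
  apply pvFoldlCongrMem
  intro acc' j hj
  rw [h i (by simp at hi; omega) j (by simp at hj; omega)]

theorem pvFinRow_aux (T : List (List Int)) (N M i : Nat) (hi : i < N) (bd : List (List Int))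
    (hsh : pvBShape bd N M) (acc : Int) :
    ∀ m, m ≤ M →
      (∀ a b : Nat, pvGet2 ((List.range m).foldl (fun p j =>
          let bd' := pvAdd2 p.1 i j (pvGet2 T i j)
          (bd', if pvGet2 bd' i j > 0 then p.2 + 1 else p.2)) (bd, acc)).1 a b
        = if i = a ∧ b < m then pvGet2 bd a b + pvGet2 T i b else pvGet2 bd a b)
      ∧ pvBShape ((List.range m).foldl (fun p j =>
          let bd' := pvAdd2 p.1 i j (pvGet2 T i j)
          (bd', if pvGet2 bd' i j > 0 then p.2 + 1 else p.2)) (bd, acc)).1 N M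
      ∧ ((List.range m).foldl (fun p j =>
          let bd' := pvAdd2 p.1 i j (pvGet2 T i j)
          (bd', if pvGet2 bd' i j > 0 then p.2 + 1 else p.2)) (bd, acc)).2
        = (List.range m).foldl (fun acc j =>
            if pvGet2 bd i j + pvGet2 T i j > 0 then acc + 1 else acc) acc := by
  intro m
  induction m with
  | zero =>
    refine fun _ => ⟨fun a b => ?_, by simpa using hsh, by simp⟩
    simp only [List.range_zero, List.foldl_nil]
    rw [if_neg (by omega)]
  | succ m ih =>
    intro hm
    obtain ⟨ihget, ihsh, ihacc⟩ := ih (by omega)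
    have hl := ihsh.1
    have hr := ihsh.2 i hi
    simp only [List.range_succ, List.foldl_append, List.foldl_cons, List.foldl_nil]
    refine ⟨fun a b => ?_, ?_, ?_⟩
    · rw [pvGet2_pvAdd2 _ _ _ _ _ _ (by rw [hl]; exact hi) (by exact lt_of_lt_of_le (by omega) hr), ihget a b]
      by_cases hia : i = a
      · subst hia
        by_cases hbm : b = m
        · subst hbm
          rw [if_neg (show ¬ (i = i ∧ b < b) by omega),
              if_pos (show i = i ∧ b = b from ⟨rfl, rfl⟩),
              if_pos (show i = i ∧ b < b + 1 from ⟨rfl, by omega⟩)]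
        · by_cases hblt : b < m
          · rw [if_pos (show i = i ∧ b < m from ⟨rfl, hblt⟩),
                if_neg (show ¬ (i = i ∧ m = b) by omega),
                if_pos (show i = i ∧ b < m + 1 from ⟨rfl, by omega⟩)]
            ring
          · rw [if_neg (show ¬ (i = i ∧ b < m) by omega),
                if_neg (show ¬ (i = i ∧ m = b) by omega),
                if_neg (show ¬ (i = i ∧ b < m + 1) by omega)]
            ring
      · rw [if_neg (show ¬ (i = a ∧ b < m) by omega),
            if_neg (show ¬ (i = a ∧ m = b) by omega),
            if_neg (show ¬ (i = a ∧ b < m + 1) by omega)]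
        ring
    · exact pvBShape_pvAdd2 _ _ _ _ _ _ ihsh
    · rw [ihacc]
      congr 1
      rw [pvGet2_pvAdd2 _ _ _ _ _ _ (by rw [hl]; exact hi) (by exact lt_of_lt_of_le (by omega) hr),
          if_pos (show i = i ∧ m = m from ⟨rfl, rfl⟩), ihget i m,
          if_neg (show ¬ (i = i ∧ m < m) by omega)]

theorem pvFinFold (T : List (List Int)) (N M : Nat) (board : List (List Int))
    (hsh : pvBShape board N M) :
    ∀ n, n ≤ N →
      (∀ a b : Nat, pvGet2 ((List.range n).foldl (pvFinRow T M) (board, 0)).1 a b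
        = if a < n ∧ b < M then pvGet2 board a b + pvGet2 T a b else pvGet2 board a b)
      ∧ pvBShape ((List.range n).foldl (pvFinRow T M) (board, 0)).1 N M
      ∧ ((List.range n).foldl (pvFinRow T M) (board, 0)).2
        = (List.range n).foldl (fun acc i =>
            (List.range M).foldl (fun acc j =>
              if pvGet2 board i j + pvGet2 T i j > 0 then acc + 1 else acc) acc) 0 := by
  intro n
  induction n with
  | zero =>
    refine fun _ => ⟨fun a b => ?_, by simpa using hsh, by simp⟩
    simp only [List.range_zero, List.foldl_nil]
    rw [if_neg (by omega)]
  | succ n ih =>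
    intro hn
    obtain ⟨ihget, ihsh, ihacc⟩ := ih (by omega)
    simp only [List.range_succ, List.foldl_append, List.foldl_cons, List.foldl_nil]
    set p := (List.range n).foldl (pvFinRow T M) (board, 0) with hp
    obtain ⟨rget, rsh, racc⟩ : _ ∧ _ ∧ _ := by
      have h := pvFinRow_aux T N M n (by omega) p.1 ihsh p.2 M (le_refl M)
      exact h
    constructor
    · intro a b
      have : pvFinRow T M p n = pvFinRow T M (p.1, p.2) n := by rw [Prod.mk.eta]
      rw [this]
      unfold pvFinRow
      rw [rget a b]
      by_cases hna : n = a
      · subst hna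
        by_cases hbM : b < M
        · rw [if_pos (show n = n ∧ b < M from ⟨rfl, hbM⟩), ihget n b,
              if_neg (show ¬ (n < n ∧ b < M) by omega),
              if_pos (show n < n + 1 ∧ b < M from ⟨by omega, hbM⟩)]
        · rw [if_neg (show ¬ (n = n ∧ b < M) by omega), ihget n b,
              if_neg (show ¬ (n < n ∧ b < M) by omega),
              if_neg (show ¬ (n < n + 1 ∧ b < M) by omega)]
      · rw [if_neg (show ¬ (n = a ∧ b < M) by omega), ihget a b]
        by_cases hc : a < n ∧ b < M
        · rw [if_pos hc, if_pos (show a < n + 1 ∧ b < M from ⟨by omega, hc.2⟩)]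
        · rw [if_neg hc, if_neg (show ¬ (a < n + 1 ∧ b < M) by omega)]
    constructor
    · have : pvFinRow T M p n = pvFinRow T M (p.1, p.2) n := by rw [Prod.mk.eta]
      rw [this]
      exact rsh
    · have : pvFinRow T M p n = pvFinRow T M (p.1, p.2) n := by rw [Prod.mk.eta]
      rw [this]
      unfold pvFinRow
      rw [racc, ihacc]
      apply pvFoldlCongrMem
      intro acc j hj
      rw [ihget n j, if_neg (show ¬ (n < n ∧ j < M) by omega)]

-- ===== VERDICT (by name: the statement is the Claim_ definition above) =====
theorem solution_spec : Claim_equal_solution := by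
  intro board skill _ hpre
  obtain ⟨hne, hrows, hok⟩ := hpre
  unfold Spec_solution
  set N := board.length with hN
  set M := (board.headD []).length with hM
  have hbshape : pvBShape board N M := by
    refine ⟨rfl, fun a ha => ?_⟩
    have hmem : board.getD a [] ∈ board := by
      rw [List.getD_eq_getElem?_getD, List.getElem?_eq_getElem ha]
      exact List.getElem_mem ha
    exact hrows _ hmem
  set t0 : List (List Int) := List.replicate (N + 1) (List.replicate (M + 1) (0 : Int)) with ht0
  set t1 := skill.foldl pvDiffStep t0 with ht1
  set t2 := (List.range N).foldl (pvRowPass M) t1 with ht2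
  set t3 := (List.range M).foldl (pvColPass N) t2 with ht3
  have hA : solution board skill = ((List.range N).foldl (pvFinRow t3 M) (board, 0)).2 := rfl
  have hB : solution_alt board skill
      = pvCount N M (fun i j => pvGet2 (skill.foldl pvRectStep board) i j) := rfl
  have s0 := pvShape_tmp0 N M
  have s1 : pvShape t1 (N + 1) (M + 1) := pvShape_skillfold skill t0 (N + 1) (M + 1) s0
  have s2 : pvShape t2 (N + 1) (M + 1) :=
    pvShape_foldl (N + 1) (M + 1) (List.range N) (pvRowPass M)
      (fun t i h => pvShape_pvRowPass _ _ _ t i h) t1 s1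
  have ht1get : ∀ k l : Nat, pvGet2 t1 k l = (skill.map (fun s => pvDif s k l)).sum := by
    intro k l
    rw [ht1, pvGet2_skillfold skill t0 N M k l hok s0, pvGet2_tmp0]
    ring
  have hcell : ∀ i, i < N → ∀ j, j < M →
      pvGet2 t3 i j = (skill.map (fun s => pvEff s i j)).sum := by
    intro i hi j hj
    rw [ht3, pvColsFold N M t2 s2 M (le_refl M) i j, if_pos ⟨hj, by omega⟩]
    have step1 : ∀ k ∈ Finset.range (i + 1),
        pvGet2 t2 k j = ∑ l ∈ Finset.range (j + 1), pvGet2 t1 k l := by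
      intro k hk
      simp only [Finset.mem_range] at hk
      rw [ht2, pvRowsFold N M t1 s1 N (le_refl N) k j, if_pos ⟨by omega, by omega⟩]
    rw [Finset.sum_congr rfl step1]
    have step2 : ∀ k ∈ Finset.range (i + 1),
        (∑ l ∈ Finset.range (j + 1), pvGet2 t1 k l)
          = ∑ l ∈ Finset.range (j + 1), (skill.map (fun s => pvDif s k l)).sum := by
      intro k _
      exact Finset.sum_congr rfl (fun l _ => ht1get k l)
    rw [Finset.sum_congr rfl step2]
    exact pvTotalSwap skill (N : Int) (M : Int) hok i j
  rw [hA, hB, (pvFinFold t3 N M board hbshape N (le_refl N)).2.2]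
  show pvCount N M (fun i j => pvGet2 board i j + pvGet2 t3 i j)
      = pvCount N M (fun i j => pvGet2 (skill.foldl pvRectStep board) i j)
  apply pvCount_congr
  intro i hi j hj
  rw [hcell i hi j hj, pvSkillFoldB skill board N M hok hbshape i j hi hj]
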